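-- pv_equiv track=rewrite | github.com/42euge/learning-bench | datasets/novel_algorithm_execution/generate.py | prism_stack
-- ===== SOURCE A (Python) =====
-- def prism_stack(lst):
--     """Complex: multi-stack algorithm with push/pop rules based on value properties."""
--     stack_a = []  # evens
--     stack_b = []  # odds
--     for x in lst:
--         if x % 2 == 0:
--             stack_a.append(x)
--             if len(stack_a) >= 3:
--                 top3 = stack_a[-3:]
--                 stack_a = stack_a[:-3]
--                 stack_a.append(sum(top3))
--         else:
--             stack_b.append(x)
--             if len(stack_b) >= 2:
--                 top2 = stack_b[-2:]
--                 stack_b = stack_b[:-2]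
--                 stack_b.append(top2[0] * top2[1])
--
--     total_a = sum(stack_a) if stack_a else 0
--     total_b = sum(stack_b) if stack_b else 0
--     return abs(total_a - total_b)
-- ===== SOURCE B (Python) =====
-- def prism_stack(lst):
--     """Simpler: one pass with scalar accumulators (even sum; odd product with a flag)."""
--     even_sum = 0
--     odd_prod = 1
--     has_odd = False
--     for x in lst:
--         if x % 2 == 0:
--             even_sum += x
--         else:
--             odd_prod *= x
--             has_odd = True
--     return abs(even_sum - (odd_prod if has_odd else 0))
-- ===== Notes on version B (the rewrite author's own statement) =====
-- stated objective: simpler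
-- what changed: Replaced the two collapsing stacks and slice machinery with three scalar accumulators (running even sum, running odd product, has-odd flag) in a single pass.
import Mathlib
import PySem

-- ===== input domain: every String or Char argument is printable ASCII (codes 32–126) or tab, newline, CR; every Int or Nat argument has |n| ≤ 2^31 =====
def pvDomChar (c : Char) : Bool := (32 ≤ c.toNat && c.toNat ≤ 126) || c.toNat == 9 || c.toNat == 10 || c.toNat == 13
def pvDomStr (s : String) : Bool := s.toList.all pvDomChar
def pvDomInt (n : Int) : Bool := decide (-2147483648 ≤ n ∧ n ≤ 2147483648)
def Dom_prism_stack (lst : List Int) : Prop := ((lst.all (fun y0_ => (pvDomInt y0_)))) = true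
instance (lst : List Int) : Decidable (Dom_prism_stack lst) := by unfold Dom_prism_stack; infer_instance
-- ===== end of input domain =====

-- B replaces A's two collapsing stacks + slice machinery with three scalar accumulators in one pass (simpler); return value proved equal.

-- ===== PORT A =====
-- literal transliteration of A's loop body: two stacks, slice-based collapse rules
def prismStackStepA (st : List Int × List Int) (x : Int) : List Int × List Int :=
  if PySem.Int.mod x 2 == 0 then
    let sa := st.1 ++ [x]
    if 3 ≤ sa.length then
      let top3 := PySem.List.slice sa (some (-3)) none          -- stack_a[-3:]
      let sa' := PySem.List.slice sa none (some (-3))           -- stack_a[:-3]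
      (sa' ++ [top3.sum], st.2)
    else (sa, st.2)
  else
    let sb := st.2 ++ [x]
    if 2 ≤ sb.length then
      let top2 := PySem.List.slice sb (some (-2)) none          -- stack_b[-2:]
      let sb' := PySem.List.slice sb none (some (-2))           -- stack_b[:-2]
      -- top2[0] * top2[1]; indices in range since len top2 = 2 (getD 0 is unreachable)
      (st.1, sb' ++ [(PySem.List.pyGet? top2 0).getD 0 * (PySem.List.pyGet? top2 1).getD 0])
    else (st.1, sb)

def prism_stack (lst : List Int) : Int :=
  let st := lst.foldl prismStackStepA ([], [])
  let total_a := if st.1 = [] then 0 else st.1.sum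
  let total_b := if st.2 = [] then 0 else st.2.sum
  |total_a - total_b|

-- ===== PORT B =====
-- state: (even_sum, odd_prod, has_odd)
def prismStackStepB (s : Int × Int × Bool) (x : Int) : Int × Int × Bool :=
  if PySem.Int.mod x 2 == 0 then (s.1 + x, s.2.1, s.2.2)
  else (s.1, s.2.1 * x, true)

def prism_stack_alt (lst : List Int) : Int :=
  let s := lst.foldl prismStackStepB (0, 1, false)
  |s.1 - (if s.2.2 then s.2.1 else 0)|

-- ===== PRECONDITION & SPEC =====
def Spec_prism_stack (lst : List Int) (out : Int) : Prop := out = prism_stack_alt lst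
instance (lst : List Int) (out : Int) : Decidable (Spec_prism_stack lst out) := by unfold Spec_prism_stack; infer_instance

-- ===== CLAIM (what is proved, stated in full; the proofs are below) =====
def Claim_equal_prism_stack : Prop := ∀ (lst : List Int), Dom_prism_stack lst → Spec_prism_stack lst (prism_stack lst)

-- ===== LEMMAS AND PROOFS =====

-- loop invariant: A's state (sa, sb) corresponds to B's state (s, p, has) iff
-- sa.sum = s, and sb = [p] when has, sb = [] ∧ p = 1 when not
def prismCorr (sa sb : List Int) (s p : Int) (has : Bool) : Prop :=
  sa.sum = s ∧ (if has then sb = [p] else sb = [] ∧ p = 1)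

lemma prismStep_corr (x : Int) (sa sb : List Int) (s p : Int) (has : Bool)
    (h : prismCorr sa sb s p has) :
    prismCorr (prismStackStepA (sa, sb) x).1 (prismStackStepA (sa, sb) x).2
      (prismStackStepB (s, p, has) x).1 (prismStackStepB (s, p, has) x).2.1
      (prismStackStepB (s, p, has) x).2.2 := by
  obtain ⟨hsum, hb⟩ := h
  by_cases he : PySem.Int.mod x 2 == 0
  · -- even: sum of stack_a preserved by the collapse
    simp only [prismStackStepA, prismStackStepB, he, if_pos]
    by_cases h3 : 3 ≤ (sa ++ [x]).length
    · simp only [h3, if_pos]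
      refine ⟨?_, hb⟩
      rw [PySem.List.slice_from_neg_ofNat (sa ++ [x]) 3 (by omega),
          PySem.List.slice_to_neg_ofNat (sa ++ [x]) 3 (by omega)]
      simp only [List.sum_append, List.sum_cons, List.sum_nil]
      have := List.sum_take_add_sum_drop (sa ++ [x]) ((sa ++ [x]).length - 3)
      simp only [List.sum_append, List.sum_cons, List.sum_nil] at this
      omega
    · simp only [h3, if_false]
      exact ⟨by simp [hsum], hb⟩
  · -- odd
    simp only [prismStackStepA, prismStackStepB, he, Bool.false_eq_true, if_false]
    cases has with
    | false =>
      obtain ⟨hb0, hp1⟩ := hb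
      subst hb0
      simp [prismCorr, hsum, hp1]
    | true =>
      simp only [if_pos] at hb
      subst hb
      have h2 : 2 ≤ ([p] ++ [x]).length := by simp
      simp only [h2, if_pos]
      refine ⟨hsum, ?_⟩
      rw [PySem.List.slice_from_neg_ofNat ([p] ++ [x]) 2 (by omega),
          PySem.List.slice_to_neg_ofNat ([p] ++ [x]) 2 (by omega)]
      simp [PySem.List.pyGet?, PySem.List.pyIdx?]

lemma prismLoop_corr (lst : List Int) :
    ∀ (sa sb : List Int) (s p : Int) (has : Bool), prismCorr sa sb s p has →
    prismCorr (lst.foldl prismStackStepA (sa, sb)).1 (lst.foldl prismStackStepA (sa, sb)).2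
      (lst.foldl prismStackStepB (s, p, has)).1 (lst.foldl prismStackStepB (s, p, has)).2.1
      (lst.foldl prismStackStepB (s, p, has)).2.2 := by
  induction lst with
  | nil => intro sa sb s p has h; exact h
  | cons x rest ih =>
    intro sa sb s p has h
    have h' := prismStep_corr x sa sb s p has h
    simpa using ih _ _ _ _ _ h'

-- ===== VERDICT (by name: the statement is the Claim_ definition above) =====
theorem prism_stack_spec : Claim_equal_prism_stack := by
  intro lst _
  unfold Spec_prism_stack prism_stack prism_stack_alt
  have h := prismLoop_corr lst [] [] 0 1 false ⟨rfl, by simp⟩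
  obtain ⟨hsum, hb⟩ := h
  set stA := lst.foldl prismStackStepA ([], [])
  set stB := lst.foldl prismStackStepB (0, 1, false)
  cases hh : stB.2.2 with
  | false =>
    rw [hh] at hb
    simp at hb
    obtain ⟨hb1, _⟩ := hb
    have h0 : stA.1.sum = stB.1 := hsum
    by_cases h : stA.1 = []
    · simp [hh, hb1, h, ← h0]
    · simp [hh, hb1, h, ← h0]
  | true =>
    rw [hh] at hb
    simp at hb
    by_cases h : stA.1 = []
    · simp [hh, hb, h, ← hsum]
    · simp [hh, hb, h, ← hsum]
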